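-- pv_equiv track=rewrite | github.com/LLagoon3/Programmers | Python3/Level_1/코딩테스트 연습 연습문제 문자열 나누기.py | solution
-- ===== SOURCE A (Python) =====
-- def solution(s):
--     res, stk = 0, [s[0]]
--     for a in s[1:]:
--         if stk == []:
--             res += 1
--             stk.append(a)
--         elif stk[-1] == a: stk.append(a)
--         else: stk.pop()
--
--     return res + (1 if not stk or len(set(stk)) == 1 else 2)
-- ===== SOURCE B (Python) =====
-- def solution(s):
--     # Staged decomposition: an outer while-loop consumes one segment at a time;
--     # an inner scan counts same/diff occurrences of the segment's first char
--     # and stops at the first index where they are equal.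
--     count = 0
--     start = 0
--     n = len(s)
--     while start < n:
--         base = s[start]
--         same = diff = 0
--         i = start
--         while i < n:
--             if s[i] == base:
--                 same += 1
--             else:
--                 diff += 1
--             if same == diff:
--                 break
--             i += 1
--         count += 1
--         start = i + 1
--     return count
-- ===== Notes on version B (the rewrite author's own statement) =====
-- stated objective: alternative
-- what changed: A makes one pass maintaining a character stack and finishes by inspecting the leftover stack with set(); B is a staged decomposition: an outer while-loop consumes one segment per iteration, an inner scan counting same/diff occurrences of the segment's first character finds each boundary, so there is no stack and no final fix-up.
import Mathlib
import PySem

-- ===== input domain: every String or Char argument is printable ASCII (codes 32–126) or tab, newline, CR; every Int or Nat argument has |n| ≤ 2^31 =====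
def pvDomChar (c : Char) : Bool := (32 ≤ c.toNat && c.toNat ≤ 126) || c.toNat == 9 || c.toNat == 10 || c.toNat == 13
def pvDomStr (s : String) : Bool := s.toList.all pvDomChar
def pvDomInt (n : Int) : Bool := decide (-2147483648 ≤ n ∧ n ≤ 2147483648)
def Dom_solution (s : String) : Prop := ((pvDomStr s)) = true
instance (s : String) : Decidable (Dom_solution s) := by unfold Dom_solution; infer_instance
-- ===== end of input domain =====

-- B replaces A's single pass with a character stack (and final set() inspection) by a staged
-- decomposition: an outer loop consumes one segment at a time, an inner same/diff scan finds
-- each segment boundary. Objective: alternative structure, same asymptotic cost.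

-- ===== PORT A =====
-- A's stack stk is modelled with its TOP at the HEAD of the list (append = cons, stk[-1] = head, pop = tail).
def solutionStepA (st : Int × List Char) (a : Char) : Int × List Char :=
  match st with
  | (res, []) => (res + 1, [a])            -- if stk == []: res += 1; stk.append(a)
  | (res, t :: ts) =>
      if t = a then (res, a :: t :: ts)    -- elif stk[-1] == a: stk.append(a)
      else (res, ts)                       -- else: stk.pop()

-- return res + (1 if not stk or len(set(stk)) == 1 else 2)
def solutionFinishA (st : Int × List Char) : Int :=
  st.1 + (if st.2 = [] ∨ PySem.Set.len (PySem.Set.ofList st.2) = 1 then 1 else 2)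

def solution (s : String) : Int :=
  match s.toList with
  | [] => 0   -- unreachable under Pre_solution: Python A raises IndexError on s[0]
  | c :: rest => solutionFinishA (rest.foldl solutionStepA (0, [c]))

-- ===== PORT B =====
-- Inner while-loop of B: scan with running same/diff counts of the segment's first char;
-- at the first position where they are equal, return the remaining suffix (Python: start = i + 1).
def findSplit (base : Char) : List Char → Int → Int → Option (List Char)
  | [], _, _ => none
  | c :: rest, same, diff =>
      let same' := same + (if c = base then 1 else 0)
      let diff' := diff + (if c = base then 0 else 1)
      if same' = diff' then some rest else findSplit base rest same' diff'

lemma findSplit_cons (base c : Char) (rest : List Char) (same diff : Int) :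
    findSplit base (c :: rest) same diff =
      if same + (if c = base then (1:Int) else 0) = diff + (if c = base then 0 else 1)
      then some rest
      else findSplit base rest (same + (if c = base then 1 else 0))
                               (diff + (if c = base then 0 else 1)) := rfl

lemma findSplit_length {base : Char} : ∀ {l : List Char} {same diff : Int} {r : List Char},
    findSplit base l same diff = some r → r.length < l.length := by
  intro l
  induction l with
  | nil => intro _ _ _ h; simp [findSplit] at h
  | cons c rest ih =>
    intro same diff r h
    rw [findSplit_cons] at h
    by_cases hc : same + (if c = base then (1:Int) else 0) = diff + (if c = base then 0 else 1)
    · rw [if_pos hc] at h; cases h; simp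
    · rw [if_neg hc] at h; exact Nat.lt_trans (ih h) (by simp)

-- Outer while-loop of B, as tail recursion on the remaining suffix of the string.
def solAltGo : List Char → Int
  | [] => 0
  | c :: rest =>
    match h : findSplit c (c :: rest) 0 0 with
    | some r => 1 + solAltGo r
    | none => 1
termination_by l => l.length
decreasing_by exact findSplit_length h

def solution_alt (s : String) : Int := solAltGo s.toList

-- ===== PRECONDITION & SPEC =====
-- Pre_ excludes only the empty string, on which Python A raises IndexError at s[0].
def Pre_solution (s : String) : Prop := s ≠ ""
instance (s : String) : Decidable (Pre_solution s) := by unfold Pre_solution; infer_instance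
def pvWitness_solution : String := "aabbac"

def Spec_solution (s : String) (out : Int) : Prop := out = solution_alt s
instance (s : String) (out : Int) : Decidable (Spec_solution s out) := by unfold Spec_solution; infer_instance

-- ===== CLAIM (what is proved, stated in full; the proofs are below) =====
def Claim_equal_solution : Prop := ∀ (s : String), Dom_solution s → Pre_solution s → Spec_solution s (solution s)

-- ===== LEMMAS AND PROOFS =====

lemma findSplit_cons_eq (base : Char) (rest : List Char) (same diff : Int) :
    findSplit base (base :: rest) same diff =
      if same + 1 = diff then some rest else findSplit base rest (same + 1) diff := by
  rw [findSplit_cons]; simp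

lemma findSplit_cons_ne {c base : Char} (h : ¬ c = base) (rest : List Char) (same diff : Int) :
    findSplit base (c :: rest) same diff =
      if same = diff + 1 then some rest else findSplit base rest same (diff + 1) := by
  rw [findSplit_cons]; simp [h]

lemma solAltGo_cons (c : Char) (rest : List Char) :
    solAltGo (c :: rest) =
      match findSplit c (c :: rest) 0 0 with
      | some r => 1 + solAltGo r
      | none => 1 := by
  rw [solAltGo]
  split <;> rename_i heq <;> rw [heq]

-- findSplit only depends on the difference same - diff.
lemma findSplit_shift (base : Char) : ∀ (l : List Char) (same diff k : Int),
    findSplit base l (same + k) (diff + k) = findSplit base l same diff := by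
  intro l
  induction l with
  | nil => intro same diff k; simp [findSplit]
  | cons c rest ih =>
    intro same diff k
    rw [findSplit_cons, findSplit_cons]
    have heq : (same + k + (if c = base then (1:Int) else 0) = diff + k + (if c = base then 0 else 1))
        ↔ (same + (if c = base then (1:Int) else 0) = diff + (if c = base then 0 else 1)) := by
      constructor <;> intro h <;> omega
    by_cases h : same + (if c = base then (1:Int) else 0) = diff + (if c = base then 0 else 1)
    · rw [if_pos h, if_pos (heq.mpr h)]
    · rw [if_neg h, if_neg (fun hh => h (heq.mp hh))]
      have e1 : same + k + (if c = base then (1:Int) else 0)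
          = same + (if c = base then (1:Int) else 0) + k := by ring
      have e2 : diff + k + (if c = base then (0:Int) else 1)
          = diff + (if c = base then (0:Int) else 1) + k := by ring
      rw [e1, e2, ih]

lemma set_ofList_replicate (n : Nat) (b : Char) :
    PySem.Set.ofList (List.replicate n b) = if n = 0 then [] else [b] := by
  have key : ∀ m : Nat, (List.replicate m b).foldl PySem.Set.add [b] = [b] := by
    intro m
    induction m with
    | zero => rfl
    | succ k ihk =>
      simp only [List.replicate, List.foldl_cons]
      have : PySem.Set.add [b] b = [b] := by simp [PySem.Set.add, PySem.Set.contains]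
      rw [this]; exact ihk
  cases n with
  | zero => rfl
  | succ m =>
    simp only [if_neg (Nat.succ_ne_zero m)]
    rw [PySem.Set.ofList_eq_foldl]
    simp only [List.replicate, List.foldl_cons]
    have : PySem.Set.add [] b = [b] := by simp [PySem.Set.add, PySem.Set.contains]
    rw [this]; exact key m

lemma finishA_replicate (res : Int) (n : Nat) (base : Char) (hn : 0 < n) :
    solutionFinishA (res, List.replicate n base) = res + 1 := by
  have h2 : PySem.Set.len (PySem.Set.ofList (List.replicate n base)) = 1 := by
    rw [set_ofList_replicate, if_neg (show ¬ n = 0 by omega)]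
    simp [PySem.Set.len]
  simp only [solutionFinishA]
  rw [if_pos (Or.inr h2)]

-- MAIN BRIDGE: while A's stack holds n copies of base (n > 0), A's remaining run equals
-- "res + 1 + (B's count of the segments after the current segment's boundary)".
lemma mainBridge : ∀ (N : ℕ) (l : List Char), l.length ≤ N →
    ∀ (n : ℕ) (base : Char) (res : Int), 0 < n →
    solutionFinishA (l.foldl solutionStepA (res, List.replicate n base)) =
      res + 1 + (match findSplit base l (n : Int) 0 with
                 | none => 0
                 | some r => solAltGo r) := by
  intro N
  induction N with
  | zero =>
    intro l hl n base res hn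
    have : l = [] := List.length_eq_zero_iff.mp (Nat.le_zero.mp hl)
    subst this
    simp [findSplit, finishA_replicate res n base hn]
  | succ N ih =>
    intro l hl n base res hn
    cases l with
    | nil => simp [findSplit, finishA_replicate res n base hn]
    | cons a t =>
      have ht : t.length ≤ N := by simpa using hl
      obtain ⟨m, rfl⟩ : ∃ m, n = m + 1 := ⟨n - 1, by omega⟩
      have hrepl : List.replicate (m + 1) base = base :: List.replicate m base := by
        simp [List.replicate_succ]
      by_cases hba : base = a
      · -- push: the stack grows; the same/diff scan keeps going (count m+2 ≠ 0)
        subst hba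
        have hstep : solutionStepA (res, List.replicate (m + 1) base) base
            = (res, List.replicate (m + 2) base) := by
          rw [hrepl]; simp [solutionStepA, List.replicate_succ]
        have hfs : findSplit base (base :: t) ((m + 1 : ℕ) : Int) 0
            = findSplit base t ((m + 2 : ℕ) : Int) 0 := by
          rw [findSplit_cons_eq]
          rw [if_neg (show ¬ ((m + 1 : ℕ) : Int) + 1 = 0 by omega)]
          congr 1
        rw [List.foldl_cons, hstep, hfs]
        exact ih t ht (m + 2) base res (by omega)
      · have hstep : solutionStepA (res, List.replicate (m + 1) base) a
            = (res, List.replicate m base) := by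
          rw [hrepl]; simp [solutionStepA, hba]
        have hne : ¬ a = base := fun h => hba h.symm
        rw [List.foldl_cons, hstep]
        cases m with
        | zero =>
          -- the stack empties exactly here: segment boundary, findSplit returns some t
          have hfs : findSplit base (a :: t) ((1 : ℕ) : Int) 0 = some t := by
            rw [findSplit_cons_ne hne]
            all_goals rw [if_pos (show ((1 : ℕ) : Int) = 0 + 1 by omega)]
          rw [hfs]
          show solutionFinishA (t.foldl solutionStepA (res, [])) = res + 1 + solAltGo t
          cases t with
          | nil => simp [solutionFinishA, solAltGo]
          | cons a' t' =>
            have hstep' : solutionStepA (res, ([] : List Char)) a' = (res + 1, [a']) := rfl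
            have ht' : t'.length ≤ N := by simp at ht; omega
            rw [List.foldl_cons, hstep']
            have h1 : ([a'] : List Char) = List.replicate 1 a' := rfl
            rw [h1, ih t' ht' 1 a' (res + 1) (by omega)]
            rw [solAltGo_cons]
            have hfs' : findSplit a' (a' :: t') 0 0 = findSplit a' t' ((1:ℕ) : Int) 0 := by
              rw [findSplit_cons_eq]
              rw [if_neg (show ¬ (0 : Int) + 1 = 0 by omega)]
              norm_num
            rw [hfs']
            cases hx : findSplit a' t' ((1:ℕ) : Int) 0 <;> (simp; all_goals ring)
        | succ k =>
          -- pop: the stack shrinks but stays nonempty; the scan keeps going (count k+1 ≠ 0)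
          have hfs : findSplit base (a :: t) ((k + 2 : ℕ) : Int) 0
              = findSplit base t ((k + 1 : ℕ) : Int) 0 := by
            rw [findSplit_cons_ne hne]
            rw [if_neg (show ¬ ((k + 2 : ℕ) : Int) = 0 + 1 by omega)]
            have e1 : ((k + 2 : ℕ) : Int) = ((k + 1 : ℕ) : Int) + 1 := by omega
            have e2 : (0 : Int) + 1 = 0 + 1 := rfl
            rw [e1, e2]
            exact findSplit_shift base t ((k + 1 : ℕ) : Int) 0 1
          rw [hfs]
          exact ih t ht (k + 1) base res (by omega)

-- ===== VERDICT (by name: the statement is the Claim_ definition above) =====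
theorem solution_spec : Claim_equal_solution := by
  intro s _ hpre
  unfold Spec_solution solution solution_alt
  match hs : s.toList with
  | [] =>
    have hs' : s = "" := by
      have h := hs
      rwa [show ([] : List Char) = "".toList from rfl, String.toList_inj] at h
    exact absurd hs' hpre
  | c :: rest =>
    show solutionFinishA (rest.foldl solutionStepA (0, [c])) = solAltGo (c :: rest)
    have h1 : ([c] : List Char) = List.replicate 1 c := rfl
    rw [h1, mainBridge rest.length rest le_rfl 1 c 0 (by omega)]
    rw [solAltGo_cons]
    have hfs : findSplit c (c :: rest) 0 0 = findSplit c rest ((1:ℕ) : Int) 0 := by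
      rw [findSplit_cons_eq]
      rw [if_neg (show ¬ (0 : Int) + 1 = 0 by omega)]
      norm_num
    rw [hfs]
    cases hx : findSplit c rest ((1:ℕ) : Int) 0 <;> simp
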